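-- pv_equiv track=rewrite | github.com/ChUrl/pyTicTacToe | TicTacToe.py | rate_score
-- ===== SOURCE A (Python) =====
-- def rate_score(score: list[int]) -> tuple[int, int]:
--     red = sum(s for s in score if s > 0)
--     blue = sum(s for s in score if s < 0)
--
--     if max(score) == 2:
--         red = 1000
--     if min(score) == -2:
--         blue = -1000
--
--     return (red, blue)
-- ===== SOURCE B (Python) =====
-- def rate_score(score: list[int]) -> tuple[int, int]:
--     srt = sorted(score)
--
--     if srt and srt[-1] == 2:
--         red = 1000
--     else:
--         red = 0
--         for s in reversed(srt):
--             if s <= 0: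
--                 break
--             red += s
--
--     if srt and srt[0] == -2:
--         blue = -1000
--     else:
--         blue = 0
--         for s in srt:
--             if s >= 0:
--                 break
--             blue += s
--
--     return (red, blue)
-- ===== Notes on version B (the rewrite author's own statement) =====
-- stated objective: alternative
-- what changed: B sorts the list once and exploits the order: the extrema are the sorted list's end elements (no max/min scans), and the positive/negative sums are taken from the contiguous positive suffix / negative prefix with early exit (skipped entirely when the 1000/-1000 override fires), instead of A's two whole-list filtered sums plus max and min passes.
-- outside the precondition, e.g. on rate_score([]): A raises ValueError, B returns (0, 0)
import Mathlib
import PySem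

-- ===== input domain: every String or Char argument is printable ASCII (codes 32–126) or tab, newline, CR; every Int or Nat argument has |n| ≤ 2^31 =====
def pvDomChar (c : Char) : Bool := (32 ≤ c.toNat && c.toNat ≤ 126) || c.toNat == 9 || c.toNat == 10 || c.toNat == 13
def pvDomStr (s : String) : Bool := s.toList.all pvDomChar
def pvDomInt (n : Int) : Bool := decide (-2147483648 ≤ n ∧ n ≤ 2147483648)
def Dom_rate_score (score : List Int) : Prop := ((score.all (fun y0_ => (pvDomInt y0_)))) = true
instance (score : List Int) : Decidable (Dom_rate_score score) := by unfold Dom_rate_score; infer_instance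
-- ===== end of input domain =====

-- B sorts once and reads the extrema off the sorted list's ends, summing only the positive suffix / negative prefix with early exit, instead of A's two filtered whole-list sums plus max and min passes; return value only.

-- ===== PORT A =====
def rate_score (score : List Int) : Int × Int :=
  let red := (score.filter (fun s => s > 0)).sum
  let blue := (score.filter (fun s => s < 0)).sum
  let red := if PySem.List.max? score (fun y => y) = some 2 then 1000 else red
  let blue := if PySem.List.min? score (fun y => y) = some (-2) then (-1000) else blue
  (red, blue)

-- ===== PORT B =====
-- 'for s in reversed(srt): if s <= 0: break; red += s' on the reversed sorted list
def scanPos : List Int → Int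
  | [] => 0
  | s :: t => if s ≤ 0 then 0 else s + scanPos t

-- 'for s in srt: if s >= 0: break; blue += s'
def scanNeg : List Int → Int
  | [] => 0
  | s :: t => if 0 ≤ s then 0 else s + scanNeg t

def rate_score_alt (score : List Int) : Int × Int :=
  let srt := PySem.List.sorted score (fun y => y) false
  let red := if srt.getLast? = some 2 then (1000 : Int) else scanPos srt.reverse
  let blue := if srt.head? = some (-2) then (-1000 : Int) else scanNeg srt
  (red, blue)

-- ===== PRECONDITION & SPEC =====
-- Pre_ excludes only the empty list, on which A's max([]) raises ValueError.
def Pre_rate_score (score : List Int) : Prop := score ≠ []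
instance (score : List Int) : Decidable (Pre_rate_score score) := by unfold Pre_rate_score; infer_instance
def pvWitness_rate_score : List Int := [2, -1, 0]

def Spec_rate_score (score : List Int) (out : Int × Int) : Prop := out = rate_score_alt score
instance (score : List Int) (out : Int × Int) : Decidable (Spec_rate_score score out) := by unfold Spec_rate_score; infer_instance

-- ===== CLAIM =====
def Claim_equal_rate_score : Prop := ∀ (score : List Int), Dom_rate_score score → Pre_rate_score score → Spec_rate_score score (rate_score score)

-- ===== LEMMAS AND PROOFS =====

-- on a non-increasing list, the early-exit positive scan sums exactly the positive elements
lemma scanPos_eq (l : List Int) (h : l.Pairwise (fun a b => a ≥ b)) :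
    scanPos l = (l.filter (fun s => s > 0)).sum := by
  induction l with
  | nil => simp [scanPos]
  | cons a t ih =>
    rw [List.pairwise_cons] at h
    rw [scanPos, List.filter_cons]
    by_cases ha : a ≤ 0
    · have hnil : t.filter (fun s => s > 0) = [] := by
        rw [List.filter_eq_nil_iff]
        intro y hy
        have := h.1 y hy
        simp; omega
      simp [ha, not_lt.mpr ha, hnil]
    · simp [ha, not_le.mp ha, ih h.2]

-- on a non-decreasing list, the early-exit negative scan sums exactly the negative elements
lemma scanNeg_eq (l : List Int) (h : l.Pairwise (fun a b => a ≤ b)) :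
    scanNeg l = (l.filter (fun s => s < 0)).sum := by
  induction l with
  | nil => simp [scanNeg]
  | cons a t ih =>
    rw [List.pairwise_cons] at h
    rw [scanNeg, List.filter_cons]
    by_cases ha : 0 ≤ a
    · have hnil : t.filter (fun s => s < 0) = [] := by
        rw [List.filter_eq_nil_iff]
        intro y hy
        have := h.1 y hy
        simp; omega
      simp [ha, not_lt.mpr ha, hnil]
    · simp [ha, not_le.mp ha, ih h.2]

-- in a non-decreasing list every element is at most the last one
lemma le_getLast_of_pairwise : ∀ (l : List Int), l.Pairwise (fun a b => a ≤ b) →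
    ∀ (hne : l ≠ []) (y : Int), y ∈ l → y ≤ l.getLast hne := by
  intro l
  induction l with
  | nil => intro _ hne; exact absurd rfl hne
  | cons a t ih =>
    intro h hne y hy
    rw [List.pairwise_cons] at h
    cases t with
    | nil =>
      simp at hy
      simp [List.getLast, hy]
    | cons b u =>
      rw [List.getLast_cons (by simp)]
      rcases List.mem_cons.mp hy with rfl | hy'
      · exact h.1 _ (List.getLast_mem (by simp))
      · exact ih h.2 (by simp) y hy'

lemma getLast?_sorted_eq_max? (score : List Int) :
    (PySem.List.sorted score (fun y => y) false).getLast? = PySem.List.max? score (fun y => y) := by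
  cases hsrt : PySem.List.sorted score (fun y => y) false with
  | nil =>
    have hs : score = [] := by rwa [PySem.List.sorted_eq_nil_iff] at hsrt
    subst hs
    rw [List.getLast?_nil, eq_comm, PySem.List.max?_eq_none_iff]
  | cons a t =>
    have hs : score ≠ [] := by
      intro h
      subst h
      have : PySem.List.sorted ([] : List Int) (fun y => y) false = [] := by
        rw [PySem.List.sorted_eq_nil_iff]
      rw [this] at hsrt
      simp at hsrt
    obtain ⟨m, hm⟩ : ∃ m, PySem.List.max? score (fun y => y) = some m := by
      cases h : PySem.List.max? score (fun y => y) with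
      | none => rw [PySem.List.max?_eq_none_iff] at h; exact absurd h hs
      | some m => exact ⟨m, rfl⟩
    have hne : (a :: t) ≠ ([] : List Int) := by simp
    have hpw : (a :: t).Pairwise (fun x y => x ≤ y) := by
      rw [← hsrt]; exact PySem.List.sorted_pairwise score (fun y => y)
    have hgmem : (a :: t).getLast hne ∈ score := by
      have h1 := PySem.List.mem_sorted score (fun y => y) false ((a :: t).getLast hne)
      rw [hsrt] at h1
      exact h1.mp (List.getLast_mem hne)
    have hmmem : m ∈ (a :: t) := by
      have h1 := PySem.List.mem_sorted score (fun y => y) false m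
      rw [hsrt] at h1
      exact h1.mpr (PySem.List.max?_mem hm)
    have h1 : m ≤ (a :: t).getLast hne := le_getLast_of_pairwise _ hpw hne m hmmem
    have h2 : (a :: t).getLast hne ≤ m := PySem.List.max?_isMax hm _ hgmem
    rw [hm, List.getLast?_eq_some_getLast hne]
    exact congrArg some (le_antisymm h2 h1)

lemma head?_sorted_eq_min? (score : List Int) :
    (PySem.List.sorted score (fun y => y) false).head? = PySem.List.min? score (fun y => y) := by
  cases hsrt : PySem.List.sorted score (fun y => y) false with
  | nil =>
    have hs : score = [] := by rwa [PySem.List.sorted_eq_nil_iff] at hsrt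
    subst hs
    rw [List.head?_nil, eq_comm, PySem.List.min?_eq_none_iff]
  | cons a t =>
    have hs : score ≠ [] := by
      intro h
      subst h
      have : PySem.List.sorted ([] : List Int) (fun y => y) false = [] := by
        rw [PySem.List.sorted_eq_nil_iff]
      rw [this] at hsrt
      simp at hsrt
    obtain ⟨m, hm⟩ : ∃ m, PySem.List.min? score (fun y => y) = some m := by
      cases h : PySem.List.min? score (fun y => y) with
      | none => rw [PySem.List.min?_eq_none_iff] at h; exact absurd h hs
      | some m => exact ⟨m, rfl⟩
    have hlb : ∀ y ∈ score, a ≤ y := PySem.List.key_head_sorted_le score (fun y => y) hsrt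
    have hamem : a ∈ score := by
      have h1 := PySem.List.mem_sorted score (fun y => y) false a
      rw [hsrt] at h1
      exact h1.mp List.mem_cons_self
    have h1 : a ≤ m := hlb m (PySem.List.min?_mem hm)
    have h2 : m ≤ a := PySem.List.min?_isMin hm a hamem
    rw [hm]
    exact congrArg some (le_antisymm h1 h2)

-- ===== VERDICT =====
theorem rate_score_spec : Claim_equal_rate_score := by
  intro score _ hpre
  unfold Spec_rate_score rate_score rate_score_alt
  have hperm : (PySem.List.sorted score (fun y => y) false).Perm score :=
    PySem.List.sorted_perm score (fun y => y) false
  have hpw : (PySem.List.sorted score (fun y => y) false).Pairwise (fun a b => a ≤ b) :=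
    PySem.List.sorted_pairwise score (fun y => y)
  have hred : scanPos (PySem.List.sorted score (fun y => y) false).reverse
      = (score.filter (fun s => s > 0)).sum := by
    rw [scanPos_eq _ (by rw [List.pairwise_reverse]; exact hpw)]
    rw [List.filter_reverse, List.sum_reverse]
    exact (hperm.filter _).sum_eq
  have hblue : scanNeg (PySem.List.sorted score (fun y => y) false)
      = (score.filter (fun s => s < 0)).sum := by
    rw [scanNeg_eq _ hpw]
    exact (hperm.filter _).sum_eq
  simp only [getLast?_sorted_eq_max?, head?_sorted_eq_min?, hred, hblue]
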